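-- pv_equiv track=rewrite | github.com/RangelGasharov/Python_Basics | algorithms/edabit_find_glasses.py | has_glasses
-- ===== SOURCE A (Python) =====
-- def has_glasses(word):
--     start_is_right = False
--     end_is_right = False
--     for i in range(len(word)):
--         if word[i] == "O" and start_is_right and word[i - 1] == "-":
--             return True
--         if word[i] == "O" and not end_is_right:
--             start_is_right = True
--         if word[i] not in ["-", "O"] and start_is_right:
--             start_is_right = False
--     return False
-- ===== SOURCE B (Python) =====
-- def has_glasses(word):
--     parts = word.split("-")
--     open_O = parts[0].endswith("O")
--     for p in parts[1:]:
--         if open_O and p.startswith("O"):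
--             return True
--         if p:
--             open_O = p.endswith("O")
--     return False
-- ===== Notes on version B (the rewrite author's own statement) =====
-- stated objective: simpler
-- what changed: Replaces A's per-character index loop with its start_is_right state machine by splitting the word on the dash separator and scanning the resulting parts once: the glasses pattern exists iff some part ending in the letter O is later followed, across only dashes or empty parts, by a part starting with that letter.
import Mathlib
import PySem

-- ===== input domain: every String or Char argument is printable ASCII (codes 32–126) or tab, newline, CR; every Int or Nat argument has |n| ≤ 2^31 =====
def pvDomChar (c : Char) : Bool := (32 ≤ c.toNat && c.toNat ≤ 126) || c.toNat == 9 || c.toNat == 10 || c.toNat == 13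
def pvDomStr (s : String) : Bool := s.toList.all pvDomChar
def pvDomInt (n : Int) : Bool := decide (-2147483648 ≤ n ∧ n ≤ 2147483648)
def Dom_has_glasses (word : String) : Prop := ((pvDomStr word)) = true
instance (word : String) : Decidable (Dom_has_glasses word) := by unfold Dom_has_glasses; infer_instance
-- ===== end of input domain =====

-- B replaces A's index-based state machine by splitting the word on '-' and scanning the
-- parts with endswith/startswith (objective: simpler, same O(n) cost).

-- ===== PORT A =====
def hasGlassesLoop (word : String) : List Int → Bool → Bool → Bool
  | [], _, _ => false
  | i :: rest, start_is_right, end_is_right =>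
    if (PySem.Str.pyGet? word i == some 'O') && start_is_right
        && (PySem.Str.pyGet? word (i - 1) == some '-') then
      true
    else
      -- `if word[i] == "O" and not end_is_right: start_is_right = True`
      let s1 := if (PySem.Str.pyGet? word i == some 'O') && !end_is_right then true
                else start_is_right
      -- `if word[i] not in ["-", "O"] and start_is_right: start_is_right = False`
      let s2 := if !((PySem.Str.pyGet? word i == some '-')
                      || (PySem.Str.pyGet? word i == some 'O')) && s1 then false
                else s1
      hasGlassesLoop word rest s2 end_is_right

def has_glasses (word : String) : Bool :=
  hasGlassesLoop word (PySem.List.pyRange 0 (PySem.Str.len word)) false false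

-- ===== PORT B =====
def hasGlassesAltLoop : List (List Char) → Bool → Bool
  | [], _ => false
  | p :: rest, openO =>
    if openO && PySem.Chars.startswith p ['O'] then true
    else if !p.isEmpty then hasGlassesAltLoop rest (PySem.Chars.endswith p ['O'])
    else hasGlassesAltLoop rest openO

def has_glasses_alt (word : String) : Bool :=
  let parts := List.splitOn '-' word.toList
  hasGlassesAltLoop parts.tail (PySem.Chars.endswith (parts.headD []) ['O'])

-- ===== PRECONDITION & SPEC =====
def Spec_has_glasses (word : String) (out : Bool) : Prop := out = has_glasses_alt word
instance (word : String) (out : Bool) : Decidable (Spec_has_glasses word out) := by unfold Spec_has_glasses; infer_instance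

-- ===== CLAIM (what is proved, stated in full; the proofs are below) =====
def Claim_equal_has_glasses : Prop := ∀ (word : String), Dom_has_glasses word → Spec_has_glasses word (has_glasses word)

-- ===== LEMMAS AND PROOFS =====

/-- Intermediate character machine for A's loop: `d` = "previous char was '-'",
    `s` = A's `start_is_right`. -/
def machA : Bool → Bool → List Char → Bool
  | _, _, [] => false
  | d, s, c :: cs =>
    if c == 'O' && s && d then true
    else machA (c == '-') ((c == 'O') || ((c == '-') && s)) cs

/-- A's state update (with `end_is_right = false`) in closed form. -/
lemma stateA_eq (c : Char) (s : Bool) :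
    (if !((c == '-') || (c == 'O'))
        && (if (c == 'O') && !false then true else s) then false
     else (if (c == 'O') && !false then true else s))
    = ((c == 'O') || ((c == '-') && s)) := by
  by_cases hO : c = 'O' <;> by_cases hD : c = '-' <;> simp [hO, hD]

/-- A's index loop from position `i ≥ 1` equals `machA` on the remaining characters. -/
lemma loopA_eq (word : String) (i : Nat) (h1 : 1 ≤ i) (s : Bool) :
    hasGlassesLoop word (PySem.List.pyRange (i : Int) (PySem.Str.len word)) s false =
    machA (word.toList[i-1]?.any (· == '-')) s (word.toList.drop i) := by
  by_cases hlt : i < word.toList.length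
  · have hcons : PySem.List.pyRange (i : Int) (PySem.Str.len word)
        = (i : Int) :: PySem.List.pyRange ((i : Int) + 1) (PySem.Str.len word) := by
      apply PySem.List.pyRange_one_cons
      simp only [PySem.Str.len]
      exact_mod_cast hlt
    have hgi : PySem.Str.pyGet? word (i : Int) = some (word.toList[i]) := by
      simp [List.getElem?_eq_getElem hlt]
    have hi1 : i - 1 < word.toList.length := by omega
    have hgm : PySem.Str.pyGet? word ((i : Int) - 1) = some (word.toList[i-1]) := by
      have : ((i : Int) - 1) = ((i - 1 : Nat) : Int) := by omega
      rw [this]; simp [List.getElem?_eq_getElem hi1]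
    have hdrop : word.toList.drop i = word.toList[i] :: word.toList.drop (i + 1) :=
      List.drop_eq_getElem_cons hlt
    have hrec := loopA_eq word (i + 1) (by omega) ((word.toList[i] == 'O')
      || ((word.toList[i] == '-') && s))
    have hsome : ∀ (a b : Char), (some a == some b) = (a == b) := by
      intro a b; cases h : a == b <;> simp_all
    have hcast : ((i : Int) + 1) = (((i + 1 : Nat)) : Int) := by push_cast; ring
    simp only [Nat.add_sub_cancel, List.getElem?_eq_getElem hlt] at hrec
    rw [hcons]
    show (if (PySem.Str.pyGet? word i == some 'O') && s
        && (PySem.Str.pyGet? word ((i : Int) - 1) == some '-') then true else _) = _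
    rw [hgi, hgm, hdrop]
    simp only [machA, hsome, stateA_eq]
    have hd : (word.toList[i-1]? ).any (· == '-') = (word.toList[i-1] == '-') := by
      simp [List.getElem?_eq_getElem hi1]
    rw [hd]
    by_cases hacc : ((word.toList[i] == 'O') && s && (word.toList[i-1] == '-')) = true
    · rw [if_pos hacc, if_pos hacc]
    · rw [if_neg hacc, if_neg hacc, hcast, hrec]
      simp
  · have hnil : PySem.List.pyRange (i : Int) (PySem.Str.len word) = [] := by
      apply PySem.List.pyRange_one_eq_nil
      simp only [PySem.Str.len]
      exact_mod_cast Nat.le_of_not_lt hlt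
    have hdrop : word.toList.drop i = [] := by
      rw [List.drop_eq_nil_iff]; omega
    rw [hnil, hdrop]
    rfl
termination_by word.toList.length - i
decreasing_by simp only [String.length_toList] at hlt ⊢; omega

/-- `p.startswith("O")` on a nonempty part. -/
lemma startswith_O (c : Char) (q : List Char) :
    PySem.Chars.startswith (c :: q) ['O'] = (c == 'O') := by
  simp [PySem.Chars.startswith, List.isPrefixOf, Bool.beq_comm]

/-- `p.endswith("O")` reads the last character. -/
lemma endswith_O (p : List Char) :
    PySem.Chars.endswith p ['O'] = (p.getLast? == some 'O') := by
  simp only [PySem.Chars.endswith, List.isSuffixOf, List.getLast?_eq_head?_reverse]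
  cases hr : p.reverse with
  | nil => rfl
  | cons h t => simp [List.isPrefixOf, Bool.beq_comm]

/-- Joint induction: `machA` right after a '-' (resp. inside a part) equals B's part scan. -/
lemma machA_splitOnP (cs : List Char) : ∀ s : Bool,
    (machA true s cs = hasGlassesAltLoop (List.splitOnP (· == '-') cs) s)
    ∧ (machA false s cs =
        hasGlassesAltLoop (List.splitOnP (· == '-') cs).tail
          (if ((List.splitOnP (· == '-') cs).headD []).isEmpty then s
           else PySem.Chars.endswith ((List.splitOnP (· == '-') cs).headD []) ['O'])) := by
  induction cs with
  | nil =>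
    intro s
    refine ⟨?_, ?_⟩
    · show false = hasGlassesAltLoop [[]] s
      simp [hasGlassesAltLoop, PySem.Chars.startswith, List.isPrefixOf]
    · rfl
  | cons c cs ih =>
    intro s
    obtain ⟨p, rest, hsplit⟩ : ∃ p rest, List.splitOnP (· == '-') cs = p :: rest := by
      rcases hx : List.splitOnP (· == '-') cs with _ | ⟨p, rest⟩
      · exact absurd hx (List.splitOnP_ne_nil _ _)
      · exact ⟨p, rest, rfl⟩
    by_cases hD : c = '-'
    · subst hD
      have hsp : List.splitOnP (· == '-') ('-' :: cs) = [] :: List.splitOnP (· == '-') cs := by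
        rw [List.splitOnP_cons]; simp
      refine ⟨?_, ?_⟩
      · rw [hsp]
        show (if ('-' == 'O') && s && true then true
              else machA ('-' == '-') ((('-' : Char) == 'O') || ((('-' : Char) == '-') && s)) cs)
            = hasGlassesAltLoop ([] :: List.splitOnP (· == '-') cs) s
        have hgoal : hasGlassesAltLoop ([] :: List.splitOnP (· == '-') cs) s
            = hasGlassesAltLoop (List.splitOnP (· == '-') cs) s := by
          show (if s && PySem.Chars.startswith [] ['O'] then true else _) = _
          simp [PySem.Chars.startswith, List.isPrefixOf]
        rw [hgoal]
        simpa using (ih s).1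
      · rw [hsp]
        show (if ('-' == 'O') && s && false then true
              else machA ('-' == '-') ((('-' : Char) == 'O') || ((('-' : Char) == '-') && s)) cs)
            = hasGlassesAltLoop (List.splitOnP (· == '-') cs) s
        simpa using (ih s).1
    · have hsp : List.splitOnP (· == '-') (c :: cs) = (c :: p) :: rest := by
        rw [List.splitOnP_cons]; simp [hD, hsplit]
      have hcd : (c == '-') = false := by simp [hD]
      have hst : ((c == 'O') || ((c == '-') && s)) = (c == 'O') := by rw [hcd]; simp
      have h2 := (ih (c == 'O')).2
      rw [hsplit] at h2
      have hif : (if p.isEmpty then (c == 'O') else PySem.Chars.endswith p ['O'])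
          = PySem.Chars.endswith (c :: p) ['O'] := by
        cases p with
        | nil => simp [endswith_O]
        | cons e es => simp [endswith_O, List.getLast?_cons_cons]
      rw [show (p :: rest).tail = rest from rfl, show (p :: rest).headD [] = p from rfl,
        hif] at h2
      -- h2 : machA false (c == 'O') cs = hasGlassesAltLoop rest (endswith (c :: p) ['O'])
      refine ⟨?_, ?_⟩
      · rw [hsp]
        show (if c == 'O' && s && true then true
              else machA (c == '-') ((c == 'O') || ((c == '-') && s)) cs)
            = hasGlassesAltLoop ((c :: p) :: rest) s
        rw [hcd]
        simp only [Bool.false_and, Bool.or_false]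
        rw [h2]
        show _ = (if s && PySem.Chars.startswith (c :: p) ['O'] then true
                  else if !(c :: p).isEmpty then
                    hasGlassesAltLoop rest (PySem.Chars.endswith (c :: p) ['O'])
                  else hasGlassesAltLoop rest s)
        rw [startswith_O]
        by_cases hO : (c == 'O') = true <;> by_cases hs : s = true <;>
          simp [hO, hs]
      · rw [hsp]
        show (if c == 'O' && s && false then true
              else machA (c == '-') ((c == 'O') || ((c == '-') && s)) cs)
            = hasGlassesAltLoop ((c :: p) :: rest).tail
                (if ((c :: p) :: rest).headD [] |>.isEmpty then s
                 else PySem.Chars.endswith (((c :: p) :: rest).headD []) ['O'])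
        rw [hcd]
        simp only [Bool.false_and, Bool.or_false]
        rw [h2]
        simp

-- ===== VERDICT (by name: the statement is the Claim_ definition above) =====
theorem has_glasses_spec : Claim_equal_has_glasses := by
  intro word _
  show has_glasses word = has_glasses_alt word
  rcases hw : word.toList with _ | ⟨c, cs⟩
  · have h0 : PySem.Str.len word = 0 := by simp [PySem.Str.len, hw]
    have hnil : PySem.List.pyRange 0 (PySem.Str.len word) = [] :=
      PySem.List.pyRange_one_eq_nil (by rw [h0])
    have hA : has_glasses word = false := by rw [has_glasses, hnil]; rfl
    have hB : has_glasses_alt word = false := by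
      rw [has_glasses_alt, hw]
      rfl
    rw [hA, hB]
  · -- first iteration (index 0) by hand, then `loopA_eq` from index 1
    have hlen : word.toList.length = cs.length + 1 := by rw [hw]; rfl
    have hpos : (0 : Int) < PySem.Str.len word := by
      simp only [PySem.Str.len, hlen]; positivity
    have hcons : PySem.List.pyRange 0 (PySem.Str.len word)
        = 0 :: PySem.List.pyRange 1 (PySem.Str.len word) := by
      have := PySem.List.pyRange_one_cons hpos
      simpa using this
    have hg0 : PySem.Str.pyGet? word (0 : Int) = some c := by
      have hpn : 0 < word.length := by rw [← String.length_toList, hlen]; omega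
      have h : PySem.Str.pyGet? word ((0 : Nat) : Int) = word.toList[(0 : Nat)]? := by
        simp [PySem.List.pyGet?, PySem.List.pyIdx?, hpn]
      rw [hw] at h
      simpa using h
    have hA : has_glasses word
        = hasGlassesLoop word (PySem.List.pyRange 1 (PySem.Str.len word)) (c == 'O') false := by
      rw [has_glasses, hcons]
      show (if (PySem.Str.pyGet? word 0 == some 'O') && false
          && (PySem.Str.pyGet? word (0 - 1) == some '-') then true else _) = _
      simp only [Bool.and_false, Bool.false_and, Bool.false_eq_true, if_false]
      rw [hg0]
      congr 1
      by_cases hO : c = 'O' <;> by_cases hD : c = '-' <;> simp [hO, hD]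
    have h1 := loopA_eq word 1 (le_refl 1) (c == 'O')
    norm_num at h1
    have htail : word.toList.tail = cs := by rw [hw]; rfl
    have hd0 : Option.any (fun x => x == '-') word.toList[0]? = (c == '-') := by simp [hw]
    rw [htail, hd0] at h1
    simp only [PySem.Str.len, String.length_toList] at hA
    rw [hA, h1]
    have hmach : machA false false word.toList = machA (c == '-') (c == 'O') cs := by
      rw [hw]
      show (if c == 'O' && false && false then true else _) = _
      simp
    rw [← hmach, (machA_splitOnP word.toList false).2]
    rw [has_glasses_alt]
    have hsplit_eq : List.splitOn '-' word.toList = List.splitOnP (· == '-') word.toList := rfl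
    simp only [hsplit_eq]
    obtain ⟨p, rest, hs⟩ : ∃ p rest, List.splitOnP (· == '-') word.toList = p :: rest := by
      rcases hx : List.splitOnP (· == '-') word.toList with _ | ⟨p, rest⟩
      · exact absurd hx (List.splitOnP_ne_nil _ _)
      · exact ⟨p, rest, rfl⟩
    rw [hs]
    cases p with
    | nil => simp [endswith_O]
    | cons d ds => simp
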